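-- pv_equiv track=rewrite | github.com/pedrofalconi-ux/POO | beecrowd4.py | minimo_tabuas
-- ===== SOURCE A (Python) =====
-- def minimo_tabuas(C, F, tabuas):
--     freq = {}
--     for t in tabuas:
--         freq[t] = freq.get(t, 0) + 1
--
--     usadas = 0
--     faixas = F
--
--     # Usa tábuas de comprimento exato
--     exatas = min(freq.get(C, 0), faixas)
--     usadas += exatas
--     faixas -= exatas
--     if C in freq:
--         freq[C] -= exatas
--
--     # Tenta formar pares
--     pares = 0
--     for x in list(freq.keys()):
--         if freq[x] == 0:
--             continue
--         y = C - x
--         if y < x:  # evitar duplicar pares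
--             continue
--         if y not in freq or freq[y] == 0:
--             continue
--
--         if x == y:
--             p = freq[x] // 2
--         else:
--             p = min(freq[x], freq[y])
--
--         usar = min(p, faixas)
--         pares += usar
--         faixas -= usar
--         freq[x] -= usar
--         freq[y] -= usar
--
--         if faixas == 0:
--             break
--
--     if faixas > 0:
--         return None  # impossível
--     return usadas + 2 * pares
-- ===== SOURCE B (Python) =====
-- def minimo_tabuas(C, F, tabuas):
--     # exact-length boards first, then pair the rest with a sort + two-ended index scan
--     exatas = min(tabuas.count(C), F)
--     a = sorted(tabuas)
--     b = []
--     skip = exatas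
--     for t in a:
--         if skip > 0 and t == C:
--             skip -= 1
--         else:
--             b.append(t)
--     pairs = 0
--     i = 0
--     j = len(b) - 1
--     while i < j:
--         s = b[i] + b[j]
--         if s == C:
--             pairs += 1
--             i += 1
--             j -= 1
--         elif s < C:
--             i += 1
--         else:
--             j -= 1
--     pares = min(pairs, F - exatas)
--     if exatas + pares < F:
--         return None
--     return exatas + 2 * pares
-- ===== Notes on version B (the rewrite author's own statement) =====
-- stated objective: alternative
-- what changed: Replaces A's frequency-dict greedy (complement lookups with in-place count/budget mutation and an early break) by sorting the boards, skipping the exact-length ones, counting complement pairs with a two-ended index scan, and applying the budget in closed form.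
import Mathlib
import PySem

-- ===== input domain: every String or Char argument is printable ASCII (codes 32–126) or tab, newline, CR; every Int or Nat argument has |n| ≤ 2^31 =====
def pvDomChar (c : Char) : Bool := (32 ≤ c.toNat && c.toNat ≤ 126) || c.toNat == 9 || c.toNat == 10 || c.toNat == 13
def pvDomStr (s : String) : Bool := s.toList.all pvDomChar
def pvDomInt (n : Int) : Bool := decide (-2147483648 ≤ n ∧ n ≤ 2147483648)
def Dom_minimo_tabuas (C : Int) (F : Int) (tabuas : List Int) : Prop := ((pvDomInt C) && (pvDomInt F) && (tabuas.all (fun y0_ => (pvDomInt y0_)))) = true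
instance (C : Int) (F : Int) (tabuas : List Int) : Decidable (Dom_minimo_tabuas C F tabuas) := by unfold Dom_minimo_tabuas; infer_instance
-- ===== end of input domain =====

-- B replaces A's frequency-dict greedy (complement lookups, in-place budget mutation, break) by a
-- sort + two-ended pairing scan with closed-form budgeting; objective: alternative algorithm, no speed claim.

-- ===== PORT A =====
-- the 'for x in list(freq.keys())' loop with its break, returning the final (pares, faixas)
def pvALoop (C : Int) : List Int → PySem.Dict Int Int → Int → Int → Int × Int
  | [], _, pares, faixas => (pares, faixas)
  | x :: ks, freq, pares, faixas =>
    if freq.getD x 0 = 0 then pvALoop C ks freq pares faixas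
    else
      let y := C - x
      if y < x then pvALoop C ks freq pares faixas
      else if freq.contains y = false ∨ freq.getD y 0 = 0 then pvALoop C ks freq pares faixas
      else
        let p := if x = y then PySem.Int.floordiv (freq.getD x 0) 2
                 else min (freq.getD x 0) (freq.getD y 0)
        let usar := min p faixas
        let pares' := pares + usar
        let faixas' := faixas - usar
        let freq1 := freq.insert x (freq.getD x 0 - usar)
        let freq2 := freq1.insert y (freq1.getD y 0 - usar)
        if faixas' = 0 then (pares', faixas')
        else pvALoop C ks freq2 pares' faixas'

def minimo_tabuas (C : Int) (F : Int) (tabuas : List Int) : Option Int :=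
  let freq := tabuas.foldl (fun d t => d.insert t (d.getD t 0 + 1)) PySem.Dict.empty
  let faixas := F
  let exatas := min (freq.getD C 0) faixas
  let usadas := 0 + exatas
  let faixas := faixas - exatas
  let freq := if freq.contains C then freq.insert C (freq.getD C 0 - exatas) else freq
  let r := pvALoop C freq.keys freq 0 faixas
  if r.2 > 0 then none else some (usadas + 2 * r.1)

-- ===== PORT B =====
-- the skip-exact-boards filter loop of Source B
def pvSkip (C : Int) : List Int → Int → List Int
  | [], _ => []
  | t :: a, skip => if skip > 0 ∧ t = C then pvSkip C a (skip - 1) else t :: pvSkip C a skip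

-- the two-ended while-loop of Source B ('while i < j: …') over indices into the fixed list b;
-- each iteration moves i up or j down, so fuel = len(b) bounds the iteration count;
-- b[i], b[j] are in range under the guard i < j combined with 0 <= i, j <= len(b)-1
def pvTwoIdx (C : Int) (b : List Int) : Nat → Int → Int → Int → Int
  | 0, _, _, pairs => pairs
  | fuel + 1, i, j, pairs =>
    if i < j then
      let s := (PySem.List.pyGet? b i).getD 0 + (PySem.List.pyGet? b j).getD 0
      if s = C then pvTwoIdx C b fuel (i + 1) (j - 1) (pairs + 1)
      else if s < C then pvTwoIdx C b fuel (i + 1) j pairs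
      else pvTwoIdx C b fuel i (j - 1) pairs
    else pairs

def minimo_tabuas_alt (C : Int) (F : Int) (tabuas : List Int) : Option Int :=
  let exatas := min ((PySem.List.count tabuas C : Int)) F
  let a := PySem.List.sorted tabuas (fun x => x)
  let b := pvSkip C a exatas
  let pairs := pvTwoIdx C b b.length 0 ((b.length : Int) - 1) 0
  let pares := min pairs (F - exatas)
  if exatas + pares < F then none else some (exatas + 2 * pares)

-- ===== PRECONDITION & SPEC =====
def Spec_minimo_tabuas (C : Int) (F : Int) (tabuas : List Int) (out : Option Int) : Prop := out = minimo_tabuas_alt C F tabuas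
instance (C : Int) (F : Int) (tabuas : List Int) (out : Option Int) : Decidable (Spec_minimo_tabuas C F tabuas out) := by unfold Spec_minimo_tabuas; infer_instance

-- ===== CLAIM (what is proved, stated in full; the proofs are below) =====
def Claim_equal_minimo_tabuas : Prop := ∀ (C : Int) (F : Int) (tabuas : List Int), Dom_minimo_tabuas C F tabuas → Spec_minimo_tabuas C F tabuas (minimo_tabuas C F tabuas)

-- ===== LEMMAS AND PROOFS =====

-- the two-ended scan phrased structurally on the remaining window (proof-layer reference)
def pvTwo (C : Int) : Nat → List Int → Int → Int
  | 0, _, pairs => pairs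
  | fuel + 1, b, pairs =>
    if 2 ≤ b.length then
      let s := (PySem.List.pyGet? b 0).getD 0 + (PySem.List.pyGet? b (-1)).getD 0
      if s = C then pvTwo C fuel (PySem.List.slice b (some 1) (some (-1))) (pairs + 1)
      else if s < C then pvTwo C fuel (PySem.List.slice b (some 1) none) pairs
      else pvTwo C fuel (PySem.List.slice b none (some (-1))) pairs
    else pairs


-- b[1:-1] as tail-then-dropLast
theorem pvSliceMid (b : List Int) :
    PySem.List.slice b (some 1) (some (-1)) = b.tail.dropLast := by
  rcases b with _ | ⟨x, t⟩
  · rfl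
  · simp only [PySem.List.slice, PySem.List.clampIdx, List.dropLast_eq_take]
    split_ifs <;> (try omega) <;>
      (first
        | (exfalso; simp only [List.length_cons] at *; omega)
        | (have e2 : min (Int.toNat 1) (x :: t).length = 1 := by simp
           have e1 : (((x :: t).length : Int) + -1).toNat = t.length := by
             simp only [List.length_cons]; omega
           rw [e2, e1]
           simp))

def pvG (C : Int) (c : Int → Int) (x : Int) : Int :=
  if x < C - x then min (c x) (c (C - x))
  else if x = C - x then PySem.Int.floordiv (c x) 2
  else 0

def pvPS (C : Int) (c : Int → Int) (K : List Int) : Int := (K.map (pvG C c)).sum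

theorem pvG_nonneg (C : Int) (c : Int → Int) (hc : ∀ z, 0 ≤ c z) (x : Int) :
    0 ≤ pvG C c x := by
  unfold pvG
  split_ifs with h1 h2
  · exact le_min (hc x) (hc (C - x))
  · rw [PySem.Int.floordiv_eq_ediv_of_pos (by norm_num)]
    exact Int.ediv_nonneg (hc x) (by norm_num)
  · exact le_refl 0

theorem pvG_gt (C : Int) (c : Int → Int) (x : Int) (h : C - x < x) : pvG C c x = 0 := by
  unfold pvG
  rw [if_neg (by omega), if_neg (by omega)]

theorem pvG_zero (C : Int) (c : Int → Int) (hc : ∀ z, 0 ≤ c z) (x : Int)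
    (hx : c x = 0) : pvG C c x = 0 := by
  unfold pvG
  split_ifs with h1 h2
  · rw [hx]; exact min_eq_left (hc (C - x))
  · rw [hx, PySem.Int.floordiv_eq_ediv_of_pos (by norm_num)]; rfl
  · rfl

theorem pvPS_nonneg (C : Int) (c : Int → Int) (hc : ∀ z, 0 ≤ c z) (K : List Int) :
    0 ≤ pvPS C c K := by
  apply List.sum_nonneg
  intro x hx
  obtain ⟨y, _, rfl⟩ := List.mem_map.mp hx
  exact pvG_nonneg C c hc y

theorem pvPS_congr (C : Int) (c c' : Int → Int) (K : List Int)
    (h : ∀ x ∈ K, pvG C c x = pvG C c' x) : pvPS C c K = pvPS C c' K := by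
  unfold pvPS
  rw [List.map_congr_left h]

theorem pvPS_filter (C : Int) (c : Int → Int) (hc : ∀ z, 0 ≤ c z) (K : List Int) :
    pvPS C c K = pvPS C c (K.filter (fun x => decide (c x ≠ 0))) := by
  induction K with
  | nil => rfl
  | cons x K ih =>
    by_cases hx : c x = 0
    · simp only [pvPS, List.map_cons, List.sum_cons, List.filter_cons] at *
      rw [pvG_zero C c hc x hx, if_neg (by simp [hx])]
      simpa using ih
    · simp only [pvPS, List.map_cons, List.sum_cons, List.filter_cons] at *
      rw [if_pos (by simp [hx])]
      simp only [List.map_cons, List.sum_cons]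
      omega

theorem pvPS_keys (C : Int) (c : Int → Int) (K K' : List Int)
    (hK : K.Nodup) (hK' : K'.Nodup) (hc : ∀ z, 0 ≤ c z)
    (hmem : ∀ z, c z ≠ 0 → (z ∈ K ↔ z ∈ K')) :
    pvPS C c K = pvPS C c K' := by
  rw [pvPS_filter C c hc K, pvPS_filter C c hc K']
  have hperm : (K.filter (fun x => decide (c x ≠ 0))).Perm (K'.filter (fun x => decide (c x ≠ 0))) := by
    rw [List.perm_ext_iff_of_nodup (hK.filter _) (hK'.filter _)]
    intro a
    simp only [List.mem_filter, decide_eq_true_eq]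
    constructor
    · rintro ⟨ha, hca⟩; exact ⟨(hmem a hca).mp ha, hca⟩
    · rintro ⟨ha, hca⟩; exact ⟨(hmem a hca).mpr ha, hca⟩
  unfold pvPS
  exact (hperm.map _).sum_eq

theorem pvSumIte (h : Int) : ∀ (K : List Int), K.Nodup → h ∈ K →
    (K.map (fun x => if x = h then (1 : Int) else 0)).sum = 1 := by
  intro K
  induction K with
  | nil => intro _ hm; cases hm
  | cons x K ih =>
    intro hnd hm
    simp only [List.map_cons, List.sum_cons]
    rcases List.mem_cons.mp hm with rfl | hm'
    · rw [if_pos rfl]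
      have h0 : ∀ y ∈ K, (if y = h then (1:Int) else 0) = 0 := by
        intro y hy
        rw [if_neg]; rintro rfl; exact (List.nodup_cons.mp hnd).1 hy
      have hs : (K.map (fun y => if y = h then (1:Int) else 0)).sum = 0 := by
        rw [List.map_congr_left h0]; simp
      omega
    · rw [if_neg (by rintro rfl; exact (List.nodup_cons.mp hnd).1 hm'), ih (List.nodup_cons.mp hnd).2 hm']
      omega

theorem pvALoop_spec (C : Int) :
    ∀ (K : List Int) (c : Int → Int) (freq : PySem.Dict Int Int) (pares faixas : Int),
      K.Nodup → 0 ≤ faixas → (∀ z, 0 ≤ c z) →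
      (∀ x ∈ K, x ≤ C - x → freq.getD x 0 = c x ∧ freq.getD (C - x) 0 = c (C - x)) →
      pvALoop C K freq pares faixas
        = (pares + min (pvPS C c K) faixas, faixas - min (pvPS C c K) faixas) := by
  intro K
  induction K with
  | nil =>
    intro c freq pares faixas _ hf _ _
    simp only [pvALoop, pvPS, List.map_nil, List.sum_nil]
    rw [min_eq_left hf]
    simp
  | cons x ks ih =>
    intro c freq pares faixas hnd hf hc hinv
    have hndk := List.nodup_cons.mp hnd
    have hinv' : ∀ x' ∈ ks, x' ≤ C - x' →
        freq.getD x' 0 = c x' ∧ freq.getD (C - x') 0 = c (C - x') :=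
      fun x' hx' => hinv x' (List.mem_cons_of_mem x hx')
    simp only [pvALoop]
    by_cases hyx : C - x < x
    · -- x can only be the larger half of a pair: the loop skips it, and pvG C c x = 0
      have hPS : pvPS C c (x :: ks) = pvPS C c ks := by
        simp [pvPS, pvG_gt C c x hyx]
      rw [hPS]
      by_cases h0 : freq.getD x 0 = 0
      · rw [if_pos h0]
        exact ih c freq pares faixas hndk.2 hf hc hinv'
      · rw [if_neg h0, if_pos hyx]
        exact ih c freq pares faixas hndk.2 hf hc hinv'
    · have hxle : x ≤ C - x := by omega
      have hfx := hinv x List.mem_cons_self hxle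
      by_cases h0 : freq.getD x 0 = 0
      · -- no board of length x left: term is 0
        have hcx : c x = 0 := by rw [← hfx.1]; exact h0
        have hPS : pvPS C c (x :: ks) = pvPS C c ks := by
          simp [pvPS, pvG_zero C c hc x hcx]
        rw [hPS, if_pos h0]
        exact ih c freq pares faixas hndk.2 hf hc hinv'
      · rw [if_neg h0, if_neg hyx]
        by_cases hcy : c (C - x) = 0
        · -- no partner available: term is 0
          have hgd : freq.getD (C - x) 0 = 0 := by rw [hfx.2]; exact hcy
          have hcx0 : c x ≠ 0 := by rw [← hfx.1]; exact h0
          have hxlt : x < C - x := by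
            rcases lt_or_eq_of_le hxle with hlt | heq
            · exact hlt
            · exact absurd (heq ▸ hcy) hcx0
          have hPS : pvPS C c (x :: ks) = pvPS C c ks := by
            have hg : pvG C c x = 0 := by
              simp only [pvG, if_pos hxlt, hcy]
              have := hc x; omega
            simp [pvPS, hg]
          rw [if_pos (Or.inr hgd), hPS]
          exact ih c freq pares faixas hndk.2 hf hc hinv'
        · -- active step: the pair (x, C-x) is used
          have hcontains : freq.contains (C - x) ≠ false := by
            intro hcon
            exact hcy (by rw [← hfx.2, PySem.Dict.getD_of_not_contains freq 0 hcon])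
          rw [if_neg (by push_neg; exact ⟨by simpa using hcontains, by rw [hfx.2]; exact hcy⟩)]
          have hp_eq : (if x = C - x then PySem.Int.floordiv (freq.getD x 0) 2
              else min (freq.getD x 0) (freq.getD (C - x) 0)) = pvG C c x := by
            rw [hfx.1, hfx.2]
            unfold pvG
            by_cases hxeq : x = C - x
            · rw [if_pos hxeq, if_neg (by omega), if_pos hxeq]
            · rw [if_neg hxeq, if_pos (by omega)]
          rw [hp_eq]
          have hg0 : 0 ≤ pvG C c x := pvG_nonneg C c hc x
          have hS0 : 0 ≤ pvPS C c ks := pvPS_nonneg C c hc ks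
          have hPS : pvPS C c (x :: ks) = pvG C c x + pvPS C c ks := by
            simp [pvPS]
          have hgle : (x = C - x → 2 * pvG C c x ≤ c x)
              ∧ (x ≠ C - x → pvG C c x ≤ c x ∧ pvG C c x ≤ c (C - x)) := by
            constructor
            · intro hxeq
              have : pvG C c x = PySem.Int.floordiv (c x) 2 := by
                simp only [pvG, if_neg (by omega : ¬ x < C - x), if_pos hxeq]
              rw [this, PySem.Int.floordiv_eq_ediv_of_pos (by norm_num)]
              have := hc x; omega
            · intro hxeq
              have : pvG C c x = min (c x) (c (C - x)) := by
                simp only [pvG, if_pos (by omega : x < C - x)]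
              rw [this]
              omega
          set usar := min (pvG C c x) faixas with husar
          by_cases hfim : faixas - usar = 0
          · rw [if_pos hfim]
            have : min (pvPS C c (x :: ks)) faixas = usar := by rw [hPS]; omega
            rw [this, Prod.mk.injEq]
            omega
          · rw [if_neg hfim]
            -- recurse with the decremented counts
            have husar0 : 0 ≤ usar := le_min hg0 hf
            have husarf : usar ≤ faixas := min_le_right _ _
            have hgd2 : ∀ z, ((freq.insert x (freq.getD x 0 - usar)).insert (C - x)
                  ((freq.insert x (freq.getD x 0 - usar)).getD (C - x) 0 - usar)).getD z 0
                = freq.getD z 0 - (if z = x then usar else 0) - (if z = C - x then usar else 0) := by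
              intro z
              rw [PySem.Dict.getD_insert]
              by_cases hz2 : z = C - x
              · rw [if_pos hz2, PySem.Dict.getD_insert]
                by_cases hz1 : z = x
                · rw [if_pos (by omega : C - x = x), if_pos hz1, if_pos hz2, hz1]
                · rw [if_neg (by omega : ¬ C - x = x), if_neg hz1, if_pos hz2, hz2]
                  omega
              · rw [if_neg hz2, PySem.Dict.getD_insert]
                by_cases hz1 : z = x
                · rw [if_pos hz1, if_pos hz1, if_neg hz2, hz1]
                  omega
                · rw [if_neg hz1, if_neg hz1, if_neg hz2]
                  omega
            have hrec := ih (fun z => c z - (if z = x then usar else 0) - (if z = C - x then usar else 0))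
              ((freq.insert x (freq.getD x 0 - usar)).insert (C - x)
                ((freq.insert x (freq.getD x 0 - usar)).getD (C - x) 0 - usar))
              (pares + usar) (faixas - usar) hndk.2 (by omega)
              (by
                intro z
                beta_reduce
                by_cases hz1 : z = x
                · by_cases hz2 : z = C - x
                  · have hxeq : x = C - x := by omega
                    have := hgle.1 hxeq
                    have := hc x
                    simp only [if_pos hz1, if_pos hz2, hz1]
                    omega
                  · have hxne : x ≠ C - x := by omega
                    have := (hgle.2 hxne).1
                    have := hc x
                    simp only [if_pos hz1, if_neg hz2, hz1]
                    omega
                · by_cases hz2 : z = C - x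
                  · have hxne : x ≠ C - x := by omega
                    have := (hgle.2 hxne).2
                    have := hc (C - x)
                    simp only [if_neg hz1, if_pos hz2, hz2]
                    omega
                  · have := hc z
                    simp only [if_neg hz1, if_neg hz2]
                    omega)
              (by
                intro x' hx' hx'le
                have hold := hinv' x' hx' hx'le
                have hne1 : x' ≠ x := fun e => hndk.1 (e ▸ hx')
                have hne2 : x' ≠ C - x := by
                  intro e
                  exact hne1 (by omega)
                have hne3 : C - x' ≠ x := by
                  intro e
                  exact hne1 (by omega)
                have hne4 : C - x' ≠ C - x := by
                  intro e
                  exact hne1 (by omega)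
                beta_reduce
                constructor
                · rw [hgd2 x', if_neg hne1, if_neg hne2, hold.1]
                · rw [hgd2 (C - x'), if_neg hne3, if_neg hne4, hold.2])
            rw [hrec]
            have hps' : pvPS C (fun z => c z - (if z = x then usar else 0)
                - (if z = C - x then usar else 0)) ks = pvPS C c ks := by
              apply pvPS_congr
              intro x' hx'
              by_cases hd : C - x' < x'
              · rw [pvG_gt _ _ _ hd, pvG_gt _ _ _ hd]
              · have hx'le : x' ≤ C - x' := by omega
                have hne1 : x' ≠ x := fun e => hndk.1 (e ▸ hx')
                have hne2 : x' ≠ C - x := by intro e; exact hne1 (by omega)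
                have hne3 : C - x' ≠ x := by intro e; exact hne1 (by omega)
                have hne4 : C - x' ≠ C - x := by intro e; exact hne1 (by omega)
                have e1 : c x' - (if x' = x then usar else 0)
                    - (if x' = C - x then usar else 0) = c x' := by
                  rw [if_neg hne1, if_neg hne2]; omega
                have e2 : c (C - x') - (if C - x' = x then usar else 0)
                    - (if C - x' = C - x then usar else 0) = c (C - x') := by
                  rw [if_neg hne3, if_neg hne4]; omega
                unfold pvG
                beta_reduce
                rw [e1, e2]
            rw [hps', hPS, Prod.mk.injEq]
            constructor <;> omega

theorem pvSkip_sublist (C : Int) : ∀ (a : List Int) (s : Int),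
    (pvSkip C a s).Sublist a := by
  intro a
  induction a with
  | nil => intro s; simp [pvSkip]
  | cons t a ih =>
    intro s
    unfold pvSkip
    split_ifs
    · exact (ih (s - 1)).cons t
    · exact (ih s).cons₂ t

theorem pvSkip_count_ne (C z : Int) (hz : z ≠ C) : ∀ (a : List Int) (s : Int),
    (pvSkip C a s).count z = a.count z := by
  intro a
  induction a with
  | nil => intro s; rfl
  | cons t a ih =>
    intro s
    unfold pvSkip
    split_ifs with h
    · rw [ih (s - 1)]
      simp only [List.count_cons, beq_iff_eq]
      rw [if_neg (by rcases h with ⟨_, rfl⟩; exact fun hh => hz hh.symm)]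
      omega
    · simp only [List.count_cons, beq_iff_eq, ih s]

theorem pvSkip_count_self (C : Int) :
    ∀ (a : List Int) (s : Int), 0 ≤ s → s ≤ (a.count C : Int) →
      ((pvSkip C a s).count C : Int) = (a.count C : Int) - s := by
  intro a
  induction a with
  | nil => intro s h0 h1; simp at h1 ⊢; omega
  | cons t a ih =>
    intro s h0 h1
    unfold pvSkip
    split_ifs with h
    · obtain ⟨hs, rfl⟩ := h
      have hc : ((t :: a).count t : Int) = (a.count t : Int) + 1 := by
        simp [List.count_cons]
      rw [ih (s - 1) (by omega) (by omega)]
      omega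
    · rcases Classical.em (t = C) with rfl | hne
      · have hs0 : s = 0 := by omega
        subst hs0
        have := ih 0 (by omega) (by omega)
        simp only [List.count_cons, beq_iff_eq, if_pos rfl] at this ⊢
        push_cast at this ⊢
        omega
      · have hcnt : ((t :: a).count C : Int) = (a.count C : Int) := by
          simp only [List.count_cons, beq_iff_eq]
          rw [if_neg hne]
          push_cast; omega
        rw [hcnt] at h1 ⊢
        have := ih s (by omega) h1
        simp only [List.count_cons, beq_iff_eq] at this ⊢
        rw [if_neg hne]
        push_cast at this ⊢
        omega

-- counts as Int, nonnegative
theorem pvCnt_nonneg (b : List Int) : ∀ z, (0:Int) ≤ ((b.count z : Nat) : Int) := by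
  intro z; exact_mod_cast Nat.zero_le _

theorem pvCnt_zero_of_not_mem (b : List Int) (z : Int) (hz : z ∉ b) :
    ((b.count z : Nat) : Int) = 0 := by
  rw [List.count_eq_zero.mpr hz]; rfl

-- a nodup list whose members are all h, containing h, is [h]
theorem pvSingleton (h : Int) : ∀ (K : List Int), K.Nodup → h ∈ K → (∀ x ∈ K, x = h) → K = [h] := by
  intro K
  induction K with
  | nil => intro _ hm; cases hm
  | cons x K ih =>
    intro hnd _ hall
    have hx : x = h := hall x List.mem_cons_self
    subst hx
    have : K = [] := by
      rcases K with _ | ⟨y, K⟩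
      · rfl
      · exfalso
        have : y = x := hall y (by simp)
        exact (List.nodup_cons.mp hnd).1 (by simp [this])
    simp [this]

-- dropping the head of a sorted list when head+last < C changes nothing
theorem pvPS_drop_head (C h l : Int) (t : List Int)
    (hb : ∀ z ∈ h :: t, h ≤ z ∧ z ≤ l) (hlt : h + l < C) :
    pvPS C (fun z => (((h :: t).count z : Nat) : Int)) (h :: t).dedup
      = pvPS C (fun z => ((t.count z : Nat) : Int)) t.dedup := by
  have hct : ∀ z, (0:Int) ≤ ((t.count z : Nat) : Int) := pvCnt_nonneg t
  have hCh : l < C - h := by omega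
  have hnm : C - h ∉ h :: t := fun hm => absurd (hb _ hm).2 (by omega)
  have hnm' : C - h ∉ t := fun hm => hnm (List.mem_cons_of_mem _ hm)
  have step1 : pvPS C (fun z => ((t.count z : Nat) : Int)) t.dedup
      = pvPS C (fun z => ((t.count z : Nat) : Int)) (h :: t).dedup := by
    apply pvPS_keys _ _ _ _ t.nodup_dedup (h :: t).nodup_dedup hct
    intro z hz
    have hzm : z ∈ t := by
      by_contra hc
      exact hz (pvCnt_zero_of_not_mem t z hc)
    simp [List.mem_dedup, hzm]
  rw [step1]
  apply pvPS_congr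
  intro x hx
  have hxb : x ∈ h :: t := List.mem_dedup.mp hx
  have hxl : x ≤ l := (hb x hxb).2
  have hcnt : ∀ z, (((h :: t).count z : Nat) : Int)
      = ((t.count z : Nat) : Int) + (if z = h then 1 else 0) := by
    intro z
    simp only [List.count_cons, beq_iff_eq]
    by_cases e : h = z <;> simp [e, eq_comm] <;> push_cast <;> omega
  by_cases hxh : x = h
  · have h1 : x < C - x := by omega
    have e1 : (((h :: t).count (C - x) : Nat) : Int) = 0 := by
      rw [hxh]; exact pvCnt_zero_of_not_mem _ _ hnm
    have e2 : ((t.count (C - x) : Nat) : Int) = 0 := by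
      rw [hxh]; exact pvCnt_zero_of_not_mem _ _ hnm'
    simp only [pvG, if_pos h1, e1, e2]
    omega
  · have hne2 : C - x ≠ h := by omega
    simp only [pvG, hcnt, if_neg hxh, if_neg hne2]
    simp

-- dropping the last of a sorted list when head+last > C changes nothing
theorem pvPS_drop_last (C h l : Int) (t : List Int)
    (hb : ∀ z ∈ t ++ [l], h ≤ z ∧ z ≤ l) (hgt : C < h + l) :
    pvPS C (fun z => (((t ++ [l]).count z : Nat) : Int)) (t ++ [l]).dedup
      = pvPS C (fun z => ((t.count z : Nat) : Int)) t.dedup := by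
  have hct : ∀ z, (0:Int) ≤ ((t.count z : Nat) : Int) := pvCnt_nonneg t
  have hCl : C - l < h := by omega
  have step1 : pvPS C (fun z => ((t.count z : Nat) : Int)) t.dedup
      = pvPS C (fun z => ((t.count z : Nat) : Int)) (t ++ [l]).dedup := by
    apply pvPS_keys _ _ _ _ t.nodup_dedup (t ++ [l]).nodup_dedup hct
    intro z hz
    have hzm : z ∈ t := by
      by_contra hc
      exact hz (pvCnt_zero_of_not_mem t z hc)
    simp [List.mem_dedup, hzm]
  rw [step1]
  apply pvPS_congr
  intro x hx
  have hxb : x ∈ t ++ [l] := List.mem_dedup.mp hx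
  have hxh : h ≤ x := (hb x hxb).1
  have hxl : x ≤ l := (hb x hxb).2
  have hcnt : ∀ z, (((t ++ [l]).count z : Nat) : Int)
      = ((t.count z : Nat) : Int) + (if z = l then 1 else 0) := by
    intro z
    simp only [List.count_append, List.count_cons, List.count_nil, beq_iff_eq]
    by_cases e : l = z <;> simp [e, eq_comm] <;> push_cast <;> omega
  by_cases hxeq : x = l
  · subst hxeq
    have h1 : ¬ (x < C - x) := by omega
    have h2 : ¬ (x = C - x) := by omega
    simp only [pvG, if_neg h1, if_neg h2]
  · have hne2 : C - x ≠ l := by omega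
    simp only [pvG, hcnt, if_neg hxeq, if_neg hne2]
    simp

-- pairing head with last when head+last = C contributes exactly one pair
theorem pvPS_pair (C h l : Int) (m : List Int)
    (hb : ∀ z ∈ h :: (m ++ [l]), h ≤ z ∧ z ≤ l) (heq : h + l = C) :
    pvPS C (fun z => (((h :: (m ++ [l])).count z : Nat) : Int)) (h :: (m ++ [l])).dedup
      = 1 + pvPS C (fun z => ((m.count z : Nat) : Int)) m.dedup := by
  have hcm : ∀ z, (0:Int) ≤ ((m.count z : Nat) : Int) := pvCnt_nonneg m
  have hcount : ∀ z, (((h :: (m ++ [l])).count z : Nat) : Int)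
      = ((m.count z : Nat) : Int) + (if z = h then 1 else 0) + (if z = l then 1 else 0) := by
    intro z
    simp only [List.count_cons, List.count_append, List.count_nil, beq_iff_eq]
    by_cases e1 : h = z <;> by_cases e2 : l = z <;>
      simp [e1, e2, eq_comm] <;> push_cast <;> omega
  have hhl : h ≤ l := (hb h (by simp)).2
  by_cases hl : h = l
  · -- all boards have the same length h, C = 2h: both sides are a halving
    subst hl
    have hall : ∀ z ∈ h :: (m ++ [h]), z = h := by
      intro z hz; have := hb z hz; omega
    have hKb : (h :: (m ++ [h])).dedup = [h] := by
      apply pvSingleton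
      · exact (h :: (m ++ [h])).nodup_dedup
      · exact List.mem_dedup.mpr (by simp)
      · intro x hx; exact hall x (List.mem_dedup.mp hx)
    have hch : ¬ (h < C - h) := by omega
    have hch2 : h = C - h := by omega
    rcases List.eq_nil_or_concat m with rfl | hm
    · -- m = []: the two boards form one pair
      rw [hKb]
      simp only [pvPS, List.map_cons, List.map_nil, List.sum_cons, List.sum_nil,
        List.dedup_nil, add_zero]
      simp only [pvG, if_neg hch, if_pos hch2]
      rw [hcount h]
      simp only [if_pos rfl, List.count_nil]
      rw [PySem.Int.floordiv_eq_ediv_of_pos (by norm_num)]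
      norm_num
    · have hmne : m ≠ [] := by rcases hm with ⟨L, b, rfl⟩; simp
      have hallm : ∀ x ∈ m, x = h := by
        intro x hx; exact hall x (by simp [hx])
      have hKm : m.dedup = [h] := by
        apply pvSingleton
        · exact m.nodup_dedup
        · exact List.mem_dedup.mpr (by
            rcases List.exists_mem_of_ne_nil m hmne with ⟨y, hy⟩
            have := hallm y hy; subst this; exact hy)
        · intro x hx; exact hallm x (List.mem_dedup.mp hx)
      rw [hKb, hKm]
      simp only [pvPS, List.map_cons, List.map_nil, List.sum_cons, List.sum_nil, add_zero]
      simp only [pvG, if_neg hch, if_pos hch2]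
      rw [hcount h]
      simp only [if_pos rfl]
      rw [PySem.Int.floordiv_eq_ediv_of_pos (by norm_num),
        PySem.Int.floordiv_eq_ediv_of_pos (by norm_num)]
      have : (0:Int) ≤ ((m.count h : Nat) : Int) := hcm h
      norm_num
      omega
  · -- h < l: the pair is counted at key h
    have hhl' : h < l := lt_of_le_of_ne hhl hl
    have hCh : C - h = l := by omega
    have step1 : pvPS C (fun z => ((m.count z : Nat) : Int)) m.dedup
        = pvPS C (fun z => ((m.count z : Nat) : Int)) (h :: (m ++ [l])).dedup := by
      apply pvPS_keys _ _ _ _ m.nodup_dedup (h :: (m ++ [l])).nodup_dedup hcm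
      intro z hz
      have hzm : z ∈ m := by
        by_contra hc
        exact hz (pvCnt_zero_of_not_mem m z hc)
      simp [List.mem_dedup, hzm]
    rw [step1]
    have hterm : ∀ x ∈ (h :: (m ++ [l])).dedup,
        pvG C (fun z => (((h :: (m ++ [l])).count z : Nat) : Int)) x
          = pvG C (fun z => ((m.count z : Nat) : Int)) x + (if x = h then 1 else 0) := by
      intro x hx
      have hxb : x ∈ h :: (m ++ [l]) := List.mem_dedup.mp hx
      have hxr : h ≤ x ∧ x ≤ l := hb x hxb
      by_cases hxh : x = h
      · subst hxh
        have h1 : x < C - x := by omega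
        simp only [pvG, if_pos h1, if_pos rfl]
        rw [hcount x, hcount (C - x)]
        split_ifs <;> omega
      · by_cases hxl : x = l
        · subst hxl
          have h1 : ¬ (x < C - x) := by omega
          have h2 : ¬ (x = C - x) := by omega
          simp only [pvG, if_neg h1, if_neg h2, if_neg hxh]
          omega
        · have e1 : (((h :: (m ++ [l])).count x : Nat) : Int) = ((m.count x : Nat) : Int) := by
            rw [hcount x, if_neg hxh, if_neg hxl]; omega
          have e2 : (((h :: (m ++ [l])).count (C - x) : Nat) : Int)
              = ((m.count (C - x) : Nat) : Int) := by
            rw [hcount (C - x), if_neg (by omega), if_neg (by omega)]; omega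
          simp only [pvG, e1, e2, if_neg hxh]
          simp
    unfold pvPS
    rw [List.map_congr_left hterm]
    have hsplit : ∀ (K : List Int),
        (K.map (fun x => pvG C (fun z => ((m.count z : Nat) : Int)) x + (if x = h then 1 else 0))).sum
          = (K.map (pvG C (fun z => ((m.count z : Nat) : Int)))).sum
            + (K.map (fun x => if x = h then (1:Int) else 0)).sum := by
      intro K
      induction K with
      | nil => simp
      | cons y K ih => simp only [List.map_cons, List.sum_cons, ih]; omega
    rw [hsplit, pvSumIte h _ (h :: (m ++ [l])).nodup_dedup (List.mem_dedup.mpr (by simp))]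
    omega

theorem pvTwo_spec (C : Int) :
    ∀ (fuel : Nat) (b : List Int), b.length ≤ fuel → b.Pairwise (· ≤ ·) → ∀ pairs : Int,
      pvTwo C fuel b pairs = pairs + pvPS C (fun z => ((b.count z : Nat) : Int)) b.dedup := by
  intro fuel
  induction fuel with
  | zero =>
    intro b hlen _ pairs
    have hb : b = [] := List.eq_nil_of_length_eq_zero (Nat.le_zero.mp hlen)
    subst hb
    simp [pvTwo, pvPS]
  | succ fuel ih =>
    intro b hlen hp pairs
    by_cases h2 : 2 ≤ b.length
    · rcases b with _ | ⟨h, rest⟩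
      · simp at h2
      rcases List.eq_nil_or_concat rest with rfl | ⟨m, l, rfl⟩
      · simp at h2
      simp only [List.concat_eq_append] at hp hlen h2 ⊢
      -- every element lies between the head h and the last l
      have hpc := List.pairwise_cons.mp hp
      have hpa := List.pairwise_append.mp hpc.2
      have hbounds : ∀ z ∈ h :: (m ++ [l]), h ≤ z ∧ z ≤ l := by
        intro z hz
        rcases List.mem_cons.mp hz with rfl | hz'
        · exact ⟨le_refl z, hpc.1 l (List.mem_append_right m (by simp))⟩
        · refine ⟨hpc.1 z hz', ?_⟩
          rcases List.mem_append.mp hz' with hzm | hzl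
          · exact hpa.2.2 z hzm l (by simp)
          · simp at hzl; omega
      have hs0 : (PySem.List.pyGet? (h :: (m ++ [l])) 0).getD 0 = h := by
        rw [PySem.List.pyGet?_zero]; rfl
      have hs1 : (PySem.List.pyGet? (h :: (m ++ [l])) (-1)).getD 0 = l := by
        rw [PySem.List.pyGet?_neg_one,
          show h :: (m ++ [l]) = (h :: m) ++ [l] from by simp, List.getLast?_concat]
        rfl
      have hlen' : (h :: (m ++ [l])).length = m.length + 2 := by simp
      simp only [pvTwo, if_pos h2]
      rw [hs0, hs1]
      by_cases hC : h + l = C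
      · rw [if_pos hC, pvSliceMid,
          show (h :: (m ++ [l])).tail.dropLast = m from by simp [List.dropLast_concat]]
        have hm : m.Pairwise (· ≤ ·) := by
          refine hp.sublist ?_
          exact (List.sublist_append_left m [l]).trans (List.sublist_cons_self _ _)
        rw [ih m (by omega) hm (pairs + 1), pvPS_pair C h l m hbounds hC]
        omega
      · rw [if_neg hC]
        by_cases hlt : h + l < C
        · rw [if_pos hlt, PySem.List.slice_from_one,
            show (h :: (m ++ [l])).tail = m ++ [l] from rfl]
          have hm : (m ++ [l]).Pairwise (· ≤ ·) := hpc.2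
          rw [ih (m ++ [l]) (by simp only [List.length_cons, List.length_append, List.length_nil] at hlen ⊢; omega) hm pairs, pvPS_drop_head C h l (m ++ [l]) hbounds hlt]
        · rw [if_neg hlt, PySem.List.slice_to_neg_one,
            show (h :: (m ++ [l])).dropLast = h :: m from by
              rw [show h :: (m ++ [l]) = (h :: m) ++ [l] from by simp, List.dropLast_concat]]
          have hm : (h :: m).Pairwise (· ≤ ·) := by
            refine hp.sublist ?_
            rw [show h :: (m ++ [l]) = (h :: m) ++ [l] from by simp]
            exact List.sublist_append_left (h :: m) [l]
          rw [ih (h :: m) (by simp only [List.length_cons, List.length_append, List.length_nil] at hlen ⊢; omega) hm pairs]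
          have hstep := pvPS_drop_last C h l (h :: m)
            (by simpa using hbounds) (by omega)
          simp only [List.cons_append] at hstep
          rw [hstep]
    · simp only [pvTwo, if_neg h2]
      rcases b with _ | ⟨u, t⟩
      · simp [pvPS]
      · rcases t with _ | ⟨v, t⟩
        · -- singleton: its only key contributes nothing
          have hz : pvG C (fun z => (([u].count z : Nat) : Int)) u = 0 := by
            unfold pvG
            beta_reduce
            split_ifs with g1 g2
            · rw [pvCnt_zero_of_not_mem [u] (C - u) (by simp; omega)]
              have := pvCnt_nonneg [u] u
              omega
            · rw [show (([u].count u : Nat) : Int) = 1 from by simp,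
                PySem.Int.floordiv_eq_ediv_of_pos (by norm_num)]
              decide
            · rfl
          have hps : pvPS C (fun z => (([u].count z : Nat) : Int)) ([u] : List Int).dedup = 0 := by
            rw [show ([u] : List Int).dedup = [u] from by simp]
            simp only [pvPS, List.map_cons, List.map_nil, List.sum_cons, List.sum_nil, hz]
            omega
          rw [hps]
          omega
        · simp at h2


-- the index-based scan of port B equals the structural window recursion pvTwo
theorem pvTwoIdx_eq (C : Int) (b : List Int) :
    ∀ (fuel : Nat) (i j pairs : Int), 0 ≤ i → i ≤ j + 1 → j < (b.length : Int) →
      pvTwoIdx C b fuel i j pairs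
        = pvTwo C fuel (PySem.List.slice b (some i) (some (j + 1))) pairs := by
  intro fuel
  induction fuel with
  | zero => intro i j pairs _ _ _; rfl
  | succ fuel ih =>
    intro i j pairs h0 hij hjl
    have h0j : (0:Int) ≤ j + 1 := by omega
    have hw := PySem.List.slice_toNat b h0 h0j
    rw [hw]
    set n : Nat := i.toNat with hn
    set k : Nat := (j + 1).toNat - n with hk
    have hlen : ((b.drop n).take k).length = k := by
      rw [List.length_take, List.length_drop]
      omega
    by_cases hij2 : i < j
    · have hkge : 2 ≤ k := by omega
      have hiN : n < b.length := by omega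
      have hjN : j.toNat < b.length := by omega
      -- the two ends of the window are b[i] and b[j]
      have hW0 : ((b.drop n).take k)[0]? = some b[n] := by
        rw [List.getElem?_take, if_pos (by omega), List.getElem?_drop]
        rw [show n + 0 = n from by omega, List.getElem?_eq_getElem hiN]
      have hWl : ((b.drop n).take k).getLast? = some b[j.toNat] := by
        rw [List.getLast?_eq_getElem?, hlen, List.getElem?_take, if_pos (by omega),
          List.getElem?_drop]
        rw [show n + (k - 1) = j.toNat from by omega, List.getElem?_eq_getElem hjN]
      have hbi : (PySem.List.pyGet? b i).getD 0 = b[n] := by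
        rw [PySem.List.pyGet?_of_nonneg b h0, List.getElem?_eq_getElem hiN]
        rfl
      have hbj : (PySem.List.pyGet? b j).getD 0 = b[j.toNat] := by
        rw [PySem.List.pyGet?_of_nonneg b (by omega : (0:Int) ≤ j), List.getElem?_eq_getElem hjN]
        rfl
      have hw0 : (PySem.List.pyGet? ((b.drop n).take k) 0).getD 0 = b[n] := by
        rw [PySem.List.pyGet?_zero, hW0]
        rfl
      have hwl : (PySem.List.pyGet? ((b.drop n).take k) (-1)).getD 0 = b[j.toNat] := by
        rw [PySem.List.pyGet?_neg_one, hWl]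
        rfl
      -- tail and dropLast of the window are the shifted windows
      have hT1 : ((b.drop n).take k).tail = (b.drop (n + 1)).take (k - 1) := by
        rw [← List.drop_one, List.drop_take, List.drop_drop]
      have hT2 : ((b.drop n).take k).dropLast = (b.drop n).take (k - 1) := by
        rw [List.dropLast_eq_take, hlen, List.take_take, min_eq_left (by omega)]
      have hT3 : ((b.drop n).take k).tail.dropLast = (b.drop (n + 1)).take (k - 2) := by
        rw [hT1, List.dropLast_eq_take, List.length_take, List.length_drop,
          List.take_take, min_eq_left (by omega)]
        congr 1
        omega
      simp only [pvTwoIdx, pvTwo, if_pos hij2, if_pos (by omega : 2 ≤ ((b.drop n).take k).length)]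
      rw [hbi, hbj, hw0, hwl]
      have hS1 : PySem.List.slice b (some (i + 1)) (some ((j - 1) + 1))
          = (b.drop (n + 1)).take (k - 2) := by
        rw [PySem.List.slice_toNat b (by omega) (by omega),
          show ((j - 1) + 1).toNat - (i + 1).toNat = k - 2 from by omega,
          show (i + 1).toNat = n + 1 from by omega]
      have hS2 : PySem.List.slice b (some (i + 1)) (some (j + 1))
          = (b.drop (n + 1)).take (k - 1) := by
        rw [PySem.List.slice_toNat b (by omega) (by omega),
          show (j + 1).toNat - (i + 1).toNat = k - 1 from by omega,
          show (i + 1).toNat = n + 1 from by omega]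
      have hS3 : PySem.List.slice b (some i) (some ((j - 1) + 1))
          = (b.drop n).take (k - 1) := by
        rw [PySem.List.slice_toNat b (by omega) (by omega),
          show ((j - 1) + 1).toNat - i.toNat = k - 1 from by omega]
      by_cases hC : b[n] + b[j.toNat] = C
      · rw [if_pos hC, if_pos hC, pvSliceMid, hT3,
          ih (i + 1) (j - 1) (pairs + 1) (by omega) (by omega) (by omega), hS1]
      · rw [if_neg hC, if_neg hC]
        by_cases hlt : b[n] + b[j.toNat] < C
        · rw [if_pos hlt, if_pos hlt, PySem.List.slice_from_one, hT1,
            ih (i + 1) j pairs (by omega) (by omega) (by omega), hS2]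
        · rw [if_neg hlt, if_neg hlt, PySem.List.slice_to_neg_one, hT2,
            ih i (j - 1) pairs h0 (by omega) (by omega), hS3]
    · have hkle : k ≤ 1 := by omega
      simp only [pvTwoIdx, pvTwo, if_neg hij2, if_neg (by omega : ¬ 2 ≤ ((b.drop n).take k).length)]

-- the full scan: indices (0, len-1) cover the whole list
theorem pvTwoIdx_full (C : Int) (b : List Int) (pairs : Int) :
    pvTwoIdx C b b.length 0 ((b.length : Int) - 1) pairs = pvTwo C b.length b pairs := by
  rw [pvTwoIdx_eq C b b.length 0 ((b.length : Int) - 1) pairs (by omega) (by omega) (by omega)]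
  congr 1
  rw [PySem.List.slice_toNat b (by omega) (by omega)]
  simp

-- ===== VERDICT (by name: the statement is the Claim_ definition above) =====
theorem minimo_tabuas_spec : Claim_equal_minimo_tabuas := by
  unfold Claim_equal_minimo_tabuas
  intro C F tabuas _
  unfold Spec_minimo_tabuas minimo_tabuas minimo_tabuas_alt
  simp only [PySem.Dict.foldl_insert_getD_add_one_eq_counter, PySem.Dict.getD_counter,
    PySem.List.count_eq]
  set ex : Int := min ((List.count C tabuas : Nat) : Int) F with hex
  set frq : PySem.Dict Int Int :=
    if (PySem.Dict.counter tabuas).contains C = true then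
      (PySem.Dict.counter tabuas).insert C (((List.count C tabuas : Nat) : Int) - ex)
    else PySem.Dict.counter tabuas with hfrq
  have hexleC : ex ≤ ((List.count C tabuas : Nat) : Int) := min_le_left _ _
  have hexleF : ex ≤ F := min_le_right _ _
  -- the mutated dictionary's values
  have hcA : ∀ z, 0 ≤ frq.getD z 0 := by
    intro z
    rw [hfrq]
    split_ifs with hcon
    · rw [PySem.Dict.getD_insert]
      split_ifs with hz
      · subst hz; omega
      · rw [PySem.Dict.getD_counter]; positivity
    · rw [PySem.Dict.getD_counter]; positivity
  have hkeys : frq.keys = PySem.Set.ofList tabuas := by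
    rw [hfrq]
    split_ifs with hcon
    · rw [PySem.Dict.keys_insert_of_contains _ _ hcon, PySem.Dict.keys_counter]
    · rw [PySem.Dict.keys_counter]
  have hknodup : frq.keys.Nodup := by rw [hkeys]; exact PySem.Set.nodup_ofList tabuas
  -- sortedness of Source B's working list
  have hsp : (PySem.List.sorted tabuas (fun x => x)).Perm tabuas :=
    PySem.List.sorted_perm tabuas (fun x => x) false
  have hpw : (pvSkip C (PySem.List.sorted tabuas (fun x => x)) ex).Pairwise (· ≤ ·) := by
    have h1 : (PySem.List.sorted tabuas (fun x => x)).Pairwise (· ≤ ·) := by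
      have := PySem.List.sorted_pairwise tabuas (fun x => x)
      simpa using this
    exact h1.sublist (pvSkip_sublist C _ ex)
  set b : List Int := pvSkip C (PySem.List.sorted tabuas (fun x => x)) ex with hb
  have hcBnn : ∀ z, (0:Int) ≤ ((b.count z : Nat) : Int) := pvCnt_nonneg b
  have htwo := pvTwo_spec C b.length b (le_refl _) hpw 0
  by_cases hF : 0 ≤ F
  · -- normal budgets: the two potentials coincide
    have hexnn : 0 ≤ ex := le_min (by positivity) hF
    have hcb : ∀ z, ((b.count z : Nat) : Int) = frq.getD z 0 := by
      intro z
      by_cases hz : z = C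
      · subst hz
        have hcnt : ((b.count z : Nat) : Int)
            = ((List.count z tabuas : Nat) : Int) - ex := by
          rw [hb]
          rw [pvSkip_count_self z (PySem.List.sorted tabuas (fun x => x)) ex hexnn
            (by rw [List.Perm.count_eq hsp]; exact hexleC)]
          rw [List.Perm.count_eq hsp]
        rw [hcnt, hfrq]
        split_ifs with hcon
        · rw [PySem.Dict.getD_insert, if_pos rfl]
        · have hcon' : tabuas.contains z = false := by
            rw [← PySem.Dict.contains_counter]
            simpa using hcon
          have hnot : z ∉ tabuas := by simpa using hcon'
          have hc0 : List.count z tabuas = 0 := List.count_eq_zero.mpr hnot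
          rw [PySem.Dict.getD_counter, hc0]
          rw [hc0] at hexleC
          simp only [Nat.cast_zero] at hexleC ⊢
          omega
      · have hcnt : ((b.count z : Nat) : Int) = ((List.count z tabuas : Nat) : Int) := by
          rw [hb, pvSkip_count_ne C z hz, List.Perm.count_eq hsp]
        rw [hcnt, hfrq]
        split_ifs with hcon
        · rw [PySem.Dict.getD_insert, if_neg hz, PySem.Dict.getD_counter]
        · rw [PySem.Dict.getD_counter]
    -- potentials agree function-wise and key-set-wise
    have hps1 : pvPS C (fun z => ((b.count z : Nat) : Int)) b.dedup
        = pvPS C (fun z => frq.getD z 0) b.dedup := by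
      apply pvPS_congr
      intro x _
      unfold pvG
      beta_reduce
      rw [hcb x, hcb (C - x)]
    have hps2 : pvPS C (fun z => frq.getD z 0) b.dedup
        = pvPS C (fun z => frq.getD z 0) frq.keys := by
      apply pvPS_keys _ _ _ _ b.nodup_dedup hknodup hcA
      intro z hz
      have hzb : z ∈ b := by
        by_contra hm
        exact hz (by rw [← hcb z]; exact pvCnt_zero_of_not_mem b z hm)
      have hzt : z ∈ tabuas := by
        exact hsp.subset ((pvSkip_sublist C (PySem.List.sorted tabuas (fun x => x)) ex).subset hzb)
      constructor
      · intro _; rw [hkeys]; exact (PySem.Set.mem_ofList tabuas z).mpr hzt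
      · intro _; exact List.mem_dedup.mpr hzb
    have hloop := pvALoop_spec C frq.keys (fun z => frq.getD z 0) frq 0 (F - ex)
      hknodup (by omega) hcA (fun x _ _ => ⟨rfl, rfl⟩)
    rw [hloop, pvTwoIdx_full, htwo, hps1, hps2]
    set S := pvPS C (fun z => frq.getD z 0) frq.keys with hS
    by_cases hcond : F - ex - min S (F - ex) > 0
    · rw [if_pos (by simpa using hcond), if_pos (by omega)]
    · rw [if_neg (by simpa using hcond), if_neg (by omega)]
      congr 1
      omega
  · -- F < 0: the exact-board budget already absorbs everything on both sides
    have hexF : ex = F := min_eq_right (by omega)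
    have hloop := pvALoop_spec C frq.keys (fun z => frq.getD z 0) frq 0 (F - ex)
      hknodup (by omega) hcA (fun x _ _ => ⟨rfl, rfl⟩)
    have hSA0 : 0 ≤ pvPS C (fun z => frq.getD z 0) frq.keys := pvPS_nonneg _ _ hcA _
    have hSB0 : 0 ≤ pvPS C (fun z => ((b.count z : Nat) : Int)) b.dedup :=
      pvPS_nonneg _ _ hcBnn _
    rw [hloop, pvTwoIdx_full, htwo]
    rw [if_neg (by simp only []; omega), if_neg (by omega)]
    congr 1
    omega
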